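-- pv_equiv track=rewrite | github.com/xiaowucn/Scriber-Backend | remarkable/predictor/models/syllabus_elt_v2.py | group_feature_by_level
-- ===== SOURCE A (Python) =====
-- from collections import Counter, defaultdict
--
-- def group_feature_by_level(model_data):
--     level_features = defaultdict(Counter)
--     for feature, cnt in model_data.items():
--         if "__regex__" in feature:
--             level = len(list(filter(None, feature.split("__regex__"))))
--         else:
--             level = len(feature.split("|"))
--         level_features[level].update({feature: cnt})
--     return sorted(level_features.items(), key=lambda p: p[0], reverse=True)
-- ===== SOURCE B (Python) =====
-- from collections import Counter
--
--
-- def group_feature_by_level(model_data):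
--     def level(feature):
--         if "__regex__" in feature:
--             return len(list(filter(None, feature.split("__regex__"))))
--         return len(feature.split("|"))
--
--     pairs = [(level(feature), feature, cnt) for feature, cnt in model_data.items()]
--     result = []
--     for lv in sorted({l for l, _, _ in pairs}, reverse=True):
--         counter = Counter()
--         for l, feature, cnt in pairs:
--             if l == lv:
--                 counter[feature] += cnt
--         result.append((lv, counter))
--     return result
-- ===== Notes on version B (the rewrite author's own statement) =====
-- stated objective: alternative
-- what changed: Replaces A's single-pass defaultdict(Counter) hash-grouping followed by a final sort of the dict items with: compute each item's level once, sort the distinct level set descending, and build each level's Counter by one filtered accumulation pass per level.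
import Mathlib
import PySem

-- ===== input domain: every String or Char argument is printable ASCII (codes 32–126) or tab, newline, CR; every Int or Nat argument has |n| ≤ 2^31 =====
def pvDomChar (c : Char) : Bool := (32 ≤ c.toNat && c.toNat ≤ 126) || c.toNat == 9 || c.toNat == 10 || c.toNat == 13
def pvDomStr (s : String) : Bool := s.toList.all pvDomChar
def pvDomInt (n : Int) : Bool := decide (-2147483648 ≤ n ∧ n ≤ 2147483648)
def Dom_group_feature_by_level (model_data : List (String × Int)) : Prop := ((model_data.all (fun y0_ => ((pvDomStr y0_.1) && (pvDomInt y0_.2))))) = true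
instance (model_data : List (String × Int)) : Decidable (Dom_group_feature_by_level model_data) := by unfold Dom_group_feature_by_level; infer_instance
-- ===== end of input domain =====

-- B replaces A's defaultdict(Counter) hash-grouping followed by a final sort with: compute each
-- item's level once, sort the distinct level set descending, and make one filtered accumulation
-- pass per level (objective: alternative decomposition, not claimed faster).

-- ===== PORT A =====
-- literal port of A: fold a dict level -> Counter over the items, then sort its items by key descending
-- (Counter/dict values are association lists per the type convention; `.items` converts at the end).
def group_feature_by_level (model_data : List (String × Int)) : List (Int × (List (String × Int))) :=
  let level_features : PySem.Dict Int (PySem.Dict String Int) :=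
    model_data.foldl (fun d p =>
      let level : Int :=
        if PySem.Str.isIn "__regex__" p.1 then
          (((PySem.Chars.splitOn p.1.toList ("__regex__".toList)).filter (fun w => !w.isEmpty)).length : Int)
        else
          ((PySem.Chars.splitOn p.1.toList ("|".toList)).length : Int)
      let c := PySem.Dict.getD d level PySem.Dict.empty
      PySem.Dict.insert d level (PySem.Dict.insert c p.1 (PySem.Dict.getD c p.1 0 + p.2)))
      PySem.Dict.empty
  (PySem.List.sorted level_features.items (fun q => q.1) true).map (fun q => (q.1, q.2.items))

-- ===== PORT B =====
-- B's helper `level` (same formula both Pythons use)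
def bLevel (feature : String) : Int :=
  if PySem.Str.isIn "__regex__" feature then
    (((PySem.Chars.splitOn feature.toList ("__regex__".toList)).filter (fun w => !w.isEmpty)).length : Int)
  else
    ((PySem.Chars.splitOn feature.toList ("|".toList)).length : Int)

def group_feature_by_level_alt (model_data : List (String × Int)) : List (Int × (List (String × Int))) :=
  let pairs := model_data.map (fun p => (bLevel p.1, p.1, p.2))
  let lvls := PySem.List.sorted (PySem.Set.ofList (pairs.map (fun t => t.1))) (fun x => x) true
  lvls.map (fun lv =>
    (lv, (pairs.foldl (fun c t =>
            if t.1 = lv then PySem.Dict.insert c t.2.1 (PySem.Dict.getD c t.2.1 0 + t.2.2) else c)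
          (PySem.Dict.empty : PySem.Dict String Int)).items))

-- ===== PRECONDITION & SPEC =====
def Spec_group_feature_by_level (model_data : List (String × Int)) (out : List (Int × (List (String × Int)))) : Prop := out = group_feature_by_level_alt model_data
instance (model_data : List (String × Int)) (out : List (Int × (List (String × Int)))) : Decidable (Spec_group_feature_by_level model_data out) := by unfold Spec_group_feature_by_level; infer_instance

-- ===== CLAIM (what is proved, stated in full; the proofs are below) =====
def Claim_equal_group_feature_by_level : Prop := ∀ (model_data : List (String × Int)), Dom_group_feature_by_level model_data → Spec_group_feature_by_level model_data (group_feature_by_level model_data)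

-- ===== LEMMAS AND PROOFS =====

-- the Counter update both Pythons perform: c[f] += n / c.update({f: n})
def cAdd (c : PySem.Dict String Int) (f : String) (n : Int) : PySem.Dict String Int :=
  PySem.Dict.insert c f (PySem.Dict.getD c f 0 + n)

-- levels of the items, in order
def lvlList (xs : List (String × Int)) : List Int := xs.map (fun p => bLevel p.1)

-- the counter a level ends up with: accumulate over the items of that level, in order
def gCnt (xs : List (String × Int)) (lv : Int) : PySem.Dict String Int :=
  (xs.filter (fun p => bLevel p.1 = lv)).foldl (fun c p => cAdd c p.1 p.2) PySem.Dict.empty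

-- canonical value of A's defaultdict after the loop
def canonD (xs : List (String × Int)) : PySem.Dict Int (PySem.Dict String Int) :=
  ⟨(PySem.Set.ofList (lvlList xs)).map (fun lv => (lv, gCnt xs lv))⟩

theorem find?_mapkeys (ks : List Int) (g : Int → PySem.Dict String Int) (lv : Int) :
    List.find? (fun p => p.1 == lv) (ks.map (fun k => (k, g k))) =
      if lv ∈ ks then some (lv, g lv) else none := by
  induction ks with
  | nil => simp
  | cons k ks ih =>
    by_cases hk : k = lv
    · subst hk; simp
    · simp [hk, Ne.symm hk, ih]

theorem getD_mapkeys (ks : List Int) (g : Int → PySem.Dict String Int) (lv : Int)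
    (d : PySem.Dict String Int) :
    PySem.Dict.getD (⟨ks.map (fun k => (k, g k))⟩ : PySem.Dict Int (PySem.Dict String Int)) lv d =
      if lv ∈ ks then g lv else d := by
  simp only [PySem.Dict.getD, PySem.Dict.get?, find?_mapkeys]
  split <;> simp

theorem contains_mapkeys (ks : List Int) (g : Int → PySem.Dict String Int) (lv : Int) :
    PySem.Dict.contains (⟨ks.map (fun k => (k, g k))⟩ : PySem.Dict Int (PySem.Dict String Int)) lv =
      decide (lv ∈ ks) := by
  simp [PySem.Dict.contains, List.any_map, Function.comp_def, List.any_beq']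

theorem insert_mapkeys_mem (ks : List Int) (g : Int → PySem.Dict String Int) (lv : Int)
    (v : PySem.Dict String Int) (hmem : lv ∈ ks) :
    PySem.Dict.insert (⟨ks.map (fun k => (k, g k))⟩ : PySem.Dict Int (PySem.Dict String Int)) lv v =
      ⟨ks.map (fun k => (k, if k = lv then v else g k))⟩ := by
  simp only [PySem.Dict.insert, contains_mapkeys, hmem, decide_true, if_true, List.map_map]
  congr 1
  refine List.map_congr_left (fun k _ => ?_)
  by_cases hk : k = lv <;> simp [hk]

theorem insert_mapkeys_not_mem (ks : List Int) (g : Int → PySem.Dict String Int) (lv : Int)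
    (v : PySem.Dict String Int) (hmem : lv ∉ ks) :
    PySem.Dict.insert (⟨ks.map (fun k => (k, g k))⟩ : PySem.Dict Int (PySem.Dict String Int)) lv v =
      ⟨ks.map (fun k => (k, g k)) ++ [(lv, v)]⟩ := by
  simp [PySem.Dict.insert, hmem]

-- one loop iteration of A preserves the canonical shape
theorem gCnt_append (ys : List (String × Int)) (x : String × Int) (k : Int) :
    gCnt (ys ++ [x]) k =
      if bLevel x.1 = k then cAdd (gCnt ys k) x.1 x.2 else gCnt ys k := by
  simp only [gCnt, List.filter_append]
  by_cases h : bLevel x.1 = k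
  · simp [h, List.foldl_append]
  · simp [h]

theorem ofList_append_singleton (l : List Int) (a : Int) :
    PySem.Set.ofList (l ++ [a]) =
      if a ∈ l then PySem.Set.ofList l else PySem.Set.ofList l ++ [a] := by
  have : PySem.Set.ofList (l ++ [a]) = PySem.Set.add (PySem.Set.ofList l) a := by
    simp [PySem.Set.ofList, List.foldl_append]
  rw [this]
  simp only [PySem.Set.add]
  by_cases h : a ∈ l
  · simp [(PySem.Set.mem_ofList l a).mpr h, h]
  · simp [h, PySem.Set.mem_ofList]

theorem canonD_step (ys : List (String × Int)) (x : String × Int) :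
    PySem.Dict.insert (canonD ys) (bLevel x.1)
        (PySem.Dict.insert (PySem.Dict.getD (canonD ys) (bLevel x.1) PySem.Dict.empty) x.1
          (PySem.Dict.getD (PySem.Dict.getD (canonD ys) (bLevel x.1) PySem.Dict.empty) x.1 0 + x.2)) =
      canonD (ys ++ [x]) := by
  by_cases hmem : bLevel x.1 ∈ lvlList ys
  · have hks : bLevel x.1 ∈ PySem.Set.ofList (lvlList ys) := (PySem.Set.mem_ofList _ _).mpr hmem
    rw [show canonD ys = ⟨(PySem.Set.ofList (lvlList ys)).map (fun lv => (lv, gCnt ys lv))⟩ from rfl,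
      getD_mapkeys, if_pos hks, insert_mapkeys_mem _ _ _ _ hks]
    have hkeys : lvlList (ys ++ [x]) = lvlList ys ++ [bLevel x.1] := by simp [lvlList]
    simp only [canonD, hkeys, ofList_append_singleton, if_pos hmem]
    congr 1
    refine List.map_congr_left (fun k _ => ?_)
    rw [gCnt_append]
    by_cases hk : k = bLevel x.1
    · simp [hk, cAdd]
    · simp [hk, Ne.symm hk]
  · have hks : bLevel x.1 ∉ PySem.Set.ofList (lvlList ys) := fun h => hmem ((PySem.Set.mem_ofList _ _).mp h)
    rw [show canonD ys = ⟨(PySem.Set.ofList (lvlList ys)).map (fun lv => (lv, gCnt ys lv))⟩ from rfl,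
      getD_mapkeys, if_neg hks, insert_mapkeys_not_mem _ _ _ _ hks]
    have hkeys : lvlList (ys ++ [x]) = lvlList ys ++ [bLevel x.1] := by simp [lvlList]
    have hfilt : (ys.filter (fun p => bLevel p.1 = bLevel x.1)) = [] := by
      refine List.filter_eq_nil_iff.mpr (fun p hp => ?_)
      simp only [decide_eq_true_eq]
      intro he
      exact hmem (he ▸ List.mem_map.mpr ⟨p, hp, rfl⟩)
    simp only [canonD, hkeys, ofList_append_singleton, if_neg hmem, List.map_append, List.map_cons,
      List.map_nil]
    congr 1
    refine congrArg₂ (· ++ ·) ?_ ?_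
    · refine List.map_congr_left (fun k hk => ?_)
      rw [gCnt_append]
      have : bLevel x.1 ≠ k := fun he => hmem (he ▸ ((PySem.Set.mem_ofList _ _).mp hk))
      simp [this]
    · rw [gCnt_append]
      simp [gCnt, hfilt, cAdd]

theorem canonD_fold (xs : List (String × Int)) :
    xs.foldl (fun d p => PySem.Dict.insert d (bLevel p.1)
        (PySem.Dict.insert (PySem.Dict.getD d (bLevel p.1) PySem.Dict.empty) p.1
          (PySem.Dict.getD (PySem.Dict.getD d (bLevel p.1) PySem.Dict.empty) p.1 0 + p.2)))
      PySem.Dict.empty = canonD xs := by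
  induction xs using List.reverseRecOn with
  | nil => rfl
  | append_singleton ys x ih => rw [List.foldl_append, ih, List.foldl_cons, List.foldl_nil, canonD_step]

-- B's inner accumulation loop over all pairs equals the per-level filtered accumulation
theorem bInner_eq_gCnt (xs : List (String × Int)) (lv : Int) :
    (xs.map (fun p => (bLevel p.1, p.1, p.2))).foldl (fun c t =>
        if t.1 = lv then PySem.Dict.insert c t.2.1 (PySem.Dict.getD c t.2.1 0 + t.2.2) else c)
      PySem.Dict.empty = gCnt xs lv := by
  rw [List.foldl_map, gCnt, List.foldl_filter]
  congr 1
  funext c p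
  simp [cAdd]

theorem sorted_canon (xs : List (String × Int)) :
    PySem.List.sorted (canonD xs).items (fun q => q.1) true =
      (PySem.List.sorted (PySem.Set.ofList (lvlList xs)) (fun x => x) true).map
        (fun lv => (lv, gCnt xs lv)) := by
  have hperm : ((PySem.List.sorted (PySem.Set.ofList (lvlList xs)) (fun x => x) true).map
      (fun lv => (lv, gCnt xs lv))).Perm (canonD xs).items :=
    (PySem.List.sorted_perm (PySem.Set.ofList (lvlList xs)) (fun x => x) true).map _
  refine PySem.List.sorted_rev_eq_of_perm_of_pairwise_gt _ _ _ hperm ?_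
  rw [List.pairwise_map]
  have h1 := PySem.List.sorted_pairwise_rev (PySem.Set.ofList (lvlList xs)) (fun x : Int => x)
  have h2 : (PySem.List.sorted (PySem.Set.ofList (lvlList xs)) (fun x => x) true).Nodup :=
    ((PySem.List.sorted_perm (PySem.Set.ofList (lvlList xs)) (fun x => x) true).symm.nodup
      (PySem.Set.nodup_ofList (lvlList xs)))
  exact (h1.and h2).imp (fun h => lt_of_le_of_ne h.1 (Ne.symm h.2))

-- ===== VERDICT (by name: the statement is the Claim_ definition above) =====
theorem group_feature_by_level_spec : Claim_equal_group_feature_by_level := by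
  intro xs _
  unfold Spec_group_feature_by_level group_feature_by_level group_feature_by_level_alt
  have hstep : (fun (d : PySem.Dict Int (PySem.Dict String Int)) (p : String × Int) =>
      let level : Int :=
        if PySem.Str.isIn "__regex__" p.1 then
          (((PySem.Chars.splitOn p.1.toList ("__regex__".toList)).filter (fun w => !w.isEmpty)).length : Int)
        else
          ((PySem.Chars.splitOn p.1.toList ("|".toList)).length : Int)
      let c := PySem.Dict.getD d level PySem.Dict.empty
      PySem.Dict.insert d level (PySem.Dict.insert c p.1 (PySem.Dict.getD c p.1 0 + p.2))) =
      (fun d p => PySem.Dict.insert d (bLevel p.1)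
        (PySem.Dict.insert (PySem.Dict.getD d (bLevel p.1) PySem.Dict.empty) p.1
          (PySem.Dict.getD (PySem.Dict.getD d (bLevel p.1) PySem.Dict.empty) p.1 0 + p.2))) := rfl
  rw [hstep, canonD_fold]
  dsimp only
  rw [sorted_canon, List.map_map, List.map_map]
  have hl : List.map ((fun t => t.1) ∘ fun p : String × Int => (bLevel p.1, p.1, p.2)) xs = lvlList xs := by
    simp [lvlList, Function.comp]
  rw [hl]
  refine List.map_congr_left (fun lv _ => ?_)
  simp only [Function.comp]
  rw [bInner_eq_gCnt]
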